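-- pv_equiv track=rewrite | github.com/chenzhao2023/ICA_Semantic_Baseline | ThinkMatch/data/artery_utils.py | find_keys_without_neighbor
-- ===== SOURCE A (Python) =====
-- def find_keys_without_neighbor(neighbors):
--     '''Find integers in list without pair (consecutive increment of + or - 1 value) in the same list'''
--     no_pair = []
--     for i in neighbors:
--         if i + 1 in neighbors:
--             continue
--         elif i - 1 in neighbors:
--             continue
--         else:
--             no_pair.append(i)
--     return no_pair
-- ===== SOURCE B (Python) =====
-- def find_keys_without_neighbor(neighbors):
--     '''Find integers in list without pair (consecutive increment of + or - 1 value) in the same list'''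
--     vals = sorted(set(neighbors))
--     n = len(vals)
--     lonely = set()
--     for idx in range(n):
--         v = vals[idx]
--         has_left = idx > 0 and vals[idx - 1] == v - 1
--         has_right = idx + 1 < n and vals[idx + 1] == v + 1
--         if not has_left and not has_right:
--             lonely.add(v)
--     return [i for i in neighbors if i in lonely]
-- ===== Notes on version B (the rewrite author's own statement) =====
-- stated objective: faster
-- what changed: Replaces the per-element linear membership scans with one sort of the distinct values and a single adjacency sweep that collects the lonely values into a set, then filters the original list through that set.
import Mathlib
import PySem

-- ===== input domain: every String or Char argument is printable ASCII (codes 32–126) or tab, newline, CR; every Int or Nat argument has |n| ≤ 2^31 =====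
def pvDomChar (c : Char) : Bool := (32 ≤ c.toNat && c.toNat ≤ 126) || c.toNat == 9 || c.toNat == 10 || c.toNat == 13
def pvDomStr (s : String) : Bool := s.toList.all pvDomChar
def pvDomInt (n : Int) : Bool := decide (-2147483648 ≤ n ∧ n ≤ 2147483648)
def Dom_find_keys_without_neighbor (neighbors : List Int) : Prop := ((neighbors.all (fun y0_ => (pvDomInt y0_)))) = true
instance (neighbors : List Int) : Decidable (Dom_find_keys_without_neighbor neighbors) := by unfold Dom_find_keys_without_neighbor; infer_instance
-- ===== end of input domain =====

-- B replaces A's per-element linear ±1 membership scans by one sort of the distinct values,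
-- a single adjacency sweep collecting the lonely values into a set, then a filter of the input.

-- ===== PORT A =====
def find_keys_without_neighbor (neighbors : List Int) : List Int :=
  neighbors.foldl (fun no_pair i =>
    if neighbors.contains (i + 1) then no_pair
    else if neighbors.contains (i - 1) then no_pair
    else no_pair ++ [i]) []

-- ===== PORT B =====
def find_keys_without_neighbor_alt (neighbors : List Int) : List Int :=
  let vals := PySem.List.sorted (PySem.Set.ofList neighbors) (fun x => x) false
  let n : Int := vals.length
  let lonely : PySem.Set Int :=
    (PySem.List.pyRange 0 n 1).foldl (fun lonely idx =>
      let v := PySem.List.pyGetD vals idx 0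
      let has_left := decide (0 < idx) && (PySem.List.pyGetD vals (idx - 1) 0 == v - 1)
      let has_right := decide (idx + 1 < n) && (PySem.List.pyGetD vals (idx + 1) 0 == v + 1)
      if !has_left && !has_right then PySem.Set.add lonely v else lonely) PySem.Set.empty
  neighbors.filter (fun i => lonely.contains i)


-- ===== PRECONDITION & SPEC =====
def Spec_find_keys_without_neighbor (neighbors : List Int) (out : List Int) : Prop := out = find_keys_without_neighbor_alt neighbors
instance (neighbors : List Int) (out : List Int) : Decidable (Spec_find_keys_without_neighbor neighbors out) := by unfold Spec_find_keys_without_neighbor; infer_instance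

-- ===== CLAIM (what is proved, stated in full; the proofs are below) =====
def Claim_equal_find_keys_without_neighbor : Prop := ∀ (neighbors : List Int), Dom_find_keys_without_neighbor neighbors → Spec_find_keys_without_neighbor neighbors (find_keys_without_neighbor neighbors)

-- ===== LEMMAS AND PROOFS =====

theorem aFold_eq_filter (ns : List Int) (l : List Int) (acc : List Int) :
    l.foldl (fun no_pair i =>
      if ns.contains (i + 1) then no_pair
      else if ns.contains (i - 1) then no_pair
      else no_pair ++ [i]) acc
    = acc ++ l.filter (fun i => !ns.contains (i + 1) && !ns.contains (i - 1)) := by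
  have hstep : (fun (no_pair : List Int) i =>
      if ns.contains (i + 1) then no_pair
      else if ns.contains (i - 1) then no_pair
      else no_pair ++ [i])
      = (fun acc i => if (!ns.contains (i + 1) && !ns.contains (i - 1)) then acc ++ [id i] else acc) := by
    funext a i
    by_cases h1 : (i + 1) ∈ ns <;> by_cases h2 : (i - 1) ∈ ns <;>
      simp [h1, h2]
  rw [hstep, PySem.List.foldl_append_if, List.map_id]

theorem mem_foldl_add (l : List Int) (p : Int → Bool) (f : Int → Int)
    (acc : PySem.Set Int) (x : Int) :
    (x ∈ l.foldl (fun s k => if p k then PySem.Set.add s (f k) else s) acc) ↔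
      x ∈ acc ∨ ∃ k ∈ l, p k = true ∧ f k = x := by
  induction l generalizing acc with
  | nil => simp
  | cons a as ih =>
    simp only [List.foldl_cons, List.mem_cons]
    by_cases hp : p a = true
    · rw [if_pos hp, ih]
      simp only [PySem.Set.mem_add]
      constructor
      · rintro (⟨h | h⟩ | ⟨k, hk, h1, h2⟩)
        · exact Or.inl h
        · exact Or.inr ⟨a, Or.inl rfl, hp, h.symm⟩
        · exact Or.inr ⟨k, Or.inr hk, h1, h2⟩
      · rintro (h | ⟨k, (rfl | hk), h1, h2⟩)
        · exact Or.inl (Or.inl h)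
        · exact Or.inl (Or.inr h2.symm)
        · exact Or.inr ⟨k, hk, h1, h2⟩
    · rw [if_neg hp, ih]
      constructor
      · rintro (h | ⟨k, hk, h1, h2⟩)
        · exact Or.inl h
        · exact Or.inr ⟨k, Or.inr hk, h1, h2⟩
      · rintro (h | ⟨k, (rfl | hk), h1, h2⟩)
        · exact Or.inl h
        · exact absurd h1 hp
        · exact Or.inr ⟨k, hk, h1, h2⟩

theorem pred_mem_iff (l : List Int) (hl : l.Pairwise (· < ·))
    (k : Nat) (hk : k < l.length) :
    (l[k] - 1 ∈ l) ↔ (0 < k ∧ l[k-1]'(by omega) = l[k] - 1) := by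
  rw [List.pairwise_iff_getElem] at hl
  constructor
  · intro hmem
    obtain ⟨j, hj, hjx⟩ := List.mem_iff_getElem.mp hmem
    have hjk : j < k := by
      rcases Nat.lt_trichotomy j k with h | h | h
      · exact h
      · subst h; omega
      · have := hl k j hk hj h; omega
    have hk0 : 0 < k := by omega
    refine ⟨hk0, ?_⟩
    have h1 : l[j] ≤ l[k-1]'(by omega) := by
      rcases Nat.lt_or_ge j (k-1) with h | h
      · exact le_of_lt (hl j (k-1) hj (by omega) h)
      · have hjeq : j = k - 1 := by omega
        subst hjeq; exact le_refl _
    have h2 : l[k-1]'(by omega) < l[k] := hl (k-1) k (by omega) hk (by omega)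
    omega
  · rintro ⟨hk0, heq⟩
    exact heq ▸ List.getElem_mem _

theorem succ_mem_iff (l : List Int) (hl : l.Pairwise (· < ·))
    (k : Nat) (hk : k < l.length) :
    (l[k] + 1 ∈ l) ↔ (k + 1 < l.length ∧ ∀ h : k + 1 < l.length, l[k+1] = l[k] + 1) := by
  rw [List.pairwise_iff_getElem] at hl
  constructor
  · intro hmem
    obtain ⟨j, hj, hjx⟩ := List.mem_iff_getElem.mp hmem
    have hjk : k < j := by
      rcases Nat.lt_trichotomy j k with h | h | h
      · have := hl j k hj hk h; omega
      · subst h; omega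
      · exact h
    refine ⟨by omega, fun h => ?_⟩
    have h1 : l[k+1] ≤ l[j] := by
      rcases Nat.lt_or_ge (k+1) j with h' | h'
      · exact le_of_lt (hl (k+1) j (by omega) hj h')
      · have hjeq : j = k + 1 := by omega
        subst hjeq; exact le_refl _
    have h2 : l[k] < l[k+1] := hl k (k+1) hk (by omega) (by omega)
    omega
  · rintro ⟨h, heq⟩
    exact (heq h) ▸ List.getElem_mem _

theorem lonely_char (l : List Int) (hl : l.Pairwise (· < ·)) (x : Int) :
    (x ∈ (PySem.List.pyRange 0 (l.length : Int) 1).foldl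
      (fun s idx =>
        if (!(decide (0 < idx) && (PySem.List.pyGetD l (idx - 1) 0 == PySem.List.pyGetD l idx 0 - 1)) &&
            !(decide (idx + 1 < (l.length : Int)) && (PySem.List.pyGetD l (idx + 1) 0 == PySem.List.pyGetD l idx 0 + 1)))
        then PySem.Set.add s (PySem.List.pyGetD l idx 0) else s) PySem.Set.empty)
    ↔ (x ∈ l ∧ x - 1 ∉ l ∧ x + 1 ∉ l) := by
  rw [mem_foldl_add]
  have hempty : x ∉ (PySem.Set.empty : PySem.Set Int) := by simp [PySem.Set.empty]
  have key : ∀ (k : Nat) (hk : k < l.length),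
      ((!(decide (0 < (k : Int)) && (PySem.List.pyGetD l ((k : Int) - 1) 0 == PySem.List.pyGetD l (k : Int) 0 - 1)) &&
        !(decide ((k : Int) + 1 < (l.length : Int)) && (PySem.List.pyGetD l ((k : Int) + 1) 0 == PySem.List.pyGetD l (k : Int) 0 + 1))) = true)
      ↔ (l[k] - 1 ∉ l ∧ l[k] + 1 ∉ l) := by
    intro k hk
    have hv : PySem.List.pyGetD l (k : Int) 0 = l[k] := by
      rw [PySem.List.pyGetD_natCast, List.getD_eq_getElem _ _ hk]
    rw [pred_mem_iff l hl k hk, succ_mem_iff l hl k hk]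
    by_cases h0 : 0 < k
    · have hcast : (k : Int) - 1 = ((k - 1 : Nat) : Int) := by omega
      have hvl : PySem.List.pyGetD l ((k : Int) - 1) 0 = l[k-1]'(by omega) := by
        rw [hcast, PySem.List.pyGetD_natCast, List.getD_eq_getElem _ _ (by omega)]
      by_cases h1 : k + 1 < l.length
      · have hcast2 : (k : Int) + 1 = ((k + 1 : Nat) : Int) := by omega
        have hvr : PySem.List.pyGetD l ((k : Int) + 1) 0 = l[k+1] := by
          rw [hcast2, PySem.List.pyGetD_natCast, List.getD_eq_getElem _ _ h1]
        simp [hv, hvl, hvr, h0, h1]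
        intro _ habs
        exact absurd habs (by omega)
      · have hge : ¬ ((k : Int) + 1 < (l.length : Int)) := by exact_mod_cast h1
        simp [hv, hvl, h0, h1, hge]
    · have hke : k = 0 := by omega
      subst hke
      by_cases h1 : 0 + 1 < l.length
      · have hvr : PySem.List.pyGetD l 1 0 = l[1]'h1 := by
          rw [show (1 : Int) = ((1 : Nat) : Int) by norm_num, PySem.List.pyGetD_natCast,
            List.getD_eq_getElem _ _ h1]
        have hv0 : PySem.List.pyGetD l 0 0 = l[0]'hk := by simpa using hv
        simp only [Nat.cast_zero, zero_sub, zero_add] at *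
        simp [h1, hv0, hvr]
      · have hge : ¬ ((0 : Int) + 1 < (l.length : Int)) := by exact_mod_cast h1
        simp only [Nat.cast_zero, zero_add] at *
        simp [h1, hge]
  constructor
  · rintro (h | ⟨idx, hidx, hp, hfx⟩)
    · exact absurd h hempty
    rw [PySem.List.mem_pyRange_one] at hidx
    obtain ⟨k, rfl⟩ : ∃ k : Nat, idx = (k : Int) := ⟨idx.toNat, by omega⟩
    have hk : k < l.length := by exact_mod_cast hidx.2
    have hv : PySem.List.pyGetD l (k : Int) 0 = l[k] := by
      rw [PySem.List.pyGetD_natCast, List.getD_eq_getElem _ _ hk]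
    rw [key k hk] at hp
    rw [hv] at hfx
    subst hfx
    exact ⟨List.getElem_mem _, hp.1, hp.2⟩
  · rintro ⟨hx, hp, hs⟩
    obtain ⟨k, hk, hkx⟩ := List.mem_iff_getElem.mp hx
    have hv : PySem.List.pyGetD l (k : Int) 0 = l[k] := by
      rw [PySem.List.pyGetD_natCast, List.getD_eq_getElem _ _ hk]
    right
    refine ⟨(k : Int), ?_, ?_, by rw [hv]; exact hkx⟩
    · rw [PySem.List.mem_pyRange_one]
      constructor
      · exact_mod_cast Nat.zero_le k
      · exact_mod_cast hk
    · rw [key k hk, hkx]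
      exact ⟨hp, hs⟩

theorem spec_main (neighbors : List Int) :
    find_keys_without_neighbor neighbors = find_keys_without_neighbor_alt neighbors := by
  have hsorted : (PySem.List.sorted (PySem.Set.ofList neighbors) (fun x => x) false).Pairwise (· < ·) :=
    PySem.List.sorted_ofList_pairwise_lt neighbors
  have hmem : ∀ y : Int, y ∈ PySem.List.sorted (PySem.Set.ofList neighbors) (fun x => x) false ↔ y ∈ neighbors := by
    intro y; rw [PySem.List.mem_sorted, PySem.Set.mem_ofList]
  have halt : find_keys_without_neighbor_alt neighbors =
      neighbors.filter (fun i =>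
        ((PySem.List.pyRange 0 ((PySem.List.sorted (PySem.Set.ofList neighbors) (fun x => x) false).length : Int) 1).foldl
          (fun s idx =>
            if (!(decide (0 < idx) && (PySem.List.pyGetD (PySem.List.sorted (PySem.Set.ofList neighbors) (fun x => x) false) (idx - 1) 0 ==
                    PySem.List.pyGetD (PySem.List.sorted (PySem.Set.ofList neighbors) (fun x => x) false) idx 0 - 1)) &&
                !(decide (idx + 1 < ((PySem.List.sorted (PySem.Set.ofList neighbors) (fun x => x) false).length : Int)) &&
                  (PySem.List.pyGetD (PySem.List.sorted (PySem.Set.ofList neighbors) (fun x => x) false) (idx + 1) 0 ==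
                    PySem.List.pyGetD (PySem.List.sorted (PySem.Set.ofList neighbors) (fun x => x) false) idx 0 + 1)))
            then PySem.Set.add s (PySem.List.pyGetD (PySem.List.sorted (PySem.Set.ofList neighbors) (fun x => x) false) idx 0) else s)
          PySem.Set.empty).contains i) := rfl
  rw [halt]
  unfold find_keys_without_neighbor
  rw [aFold_eq_filter, List.nil_append]
  apply List.filter_congr
  intro i hi
  have hchar := lonely_char _ hsorted i
  rw [Bool.eq_iff_iff]
  rw [PySem.Set.contains_iff, hchar]
  simp only [hmem]
  simp [hi]
  tauto

-- ===== VERDICT (by name: the statement is the Claim_ definition above) =====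
theorem find_keys_without_neighbor_spec : Claim_equal_find_keys_without_neighbor := by
  intro neighbors _
  unfold Spec_find_keys_without_neighbor
  exact spec_main neighbors
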